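-- pv_equiv track=rewrite | github.com/shinhyuk-choi/the-algo | stack_02.py | solution
-- ===== SOURCE A (Python) =====
-- def solution(input_list):
--     stack = []
--     result = 0
--     for i, v in enumerate(input_list):
--         if v == '(':
--             stack.append((i, v))
--         elif v == ')':
--             temp = stack.pop()
--             if i - temp[0] == 1:
--                 result += len(stack)
--             else:
--                 result += 1
--
--     return result
-- ===== SOURCE B (Python) =====
-- def solution(input_list):
--     lst = list(input_list)
--     n = len(lst)
--
--     def parse(i, depth, total):
--         # parse one nesting level starting at index i;
--         # returns (total', index after this level's closing ')', closed?)
--         while i < n: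
--             v = lst[i]
--             if v == ')':
--                 return total, i + 1, True
--             if v == '(' and i + 1 < n and lst[i + 1] == ')':
--                 total += depth          # a laser: splits every rod still open around it
--                 i += 2
--             elif v == '(':
--                 sub, i, closed = parse(i + 1, depth + 1, 0)
--                 total += sub + (1 if closed else 0)   # a closed rod contributes one piece
--             else:
--                 i += 1
--         return total, i, False
--
--     return parse(0, 0, 0)[0]
-- ===== Notes on version B (the rewrite author's own statement) =====
-- stated objective: alternative
-- what changed: Replaced the stack-driven single pass with a recursive-descent parser over the nesting structure: each level is parsed as a sequence, counting lasers '()' at its own depth and adding 1 per closed sub-rod, so no stack, enumerate or per-index bookkeeping remains.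
-- outside the precondition, e.g. on solution([')']): A raises IndexError, B returns 0
import Mathlib
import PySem

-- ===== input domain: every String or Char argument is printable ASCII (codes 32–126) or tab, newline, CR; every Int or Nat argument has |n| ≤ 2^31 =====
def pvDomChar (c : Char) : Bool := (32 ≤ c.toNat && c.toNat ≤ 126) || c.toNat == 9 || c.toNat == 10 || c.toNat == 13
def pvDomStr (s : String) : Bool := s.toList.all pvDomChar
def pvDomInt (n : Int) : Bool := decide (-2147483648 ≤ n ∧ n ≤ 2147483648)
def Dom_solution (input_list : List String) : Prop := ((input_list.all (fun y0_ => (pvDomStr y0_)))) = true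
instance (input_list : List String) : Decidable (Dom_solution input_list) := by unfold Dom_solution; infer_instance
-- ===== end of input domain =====

-- B replaces A's stack-driven single pass by a recursive-descent parse of the
-- nesting structure (each level counts its lasers at its own depth and adds 1
-- per closed rod); equivalence is claimed on inputs whose ')' are all matched
-- (elsewhere A's stack.pop() raises IndexError).


-- ===== PORT A =====
-- one loop step of A; on ')' with empty stack Python raises IndexError (pop? = none):
-- that input is excluded by Pre_solution, the port leaves the state unchanged there.
def stepA (st : List (Int × String) × Int) (iv : Int × String) : List (Int × String) × Int :=
  if iv.2 = "(" then (st.1 ++ [(iv.1, iv.2)], st.2)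
  else if iv.2 = ")" then
    match PySem.List.pop? st.1 (-1) with
    | some (temp, rest) =>
        if iv.1 - temp.1 = 1 then (rest, st.2 + rest.length) else (rest, st.2 + 1)
    | none => (st.1, st.2)
  else st

def solution (input_list : List String) : Int :=
  ((PySem.List.enumerate input_list 0).foldl stepA ([], 0)).2

-- ===== PORT B =====
-- Source B's recursive parse: the Python index i is transcribed as the suffix `rest`
-- (= lst[i:]); the while loop is the tail-recursive continuation carrying `total`,
-- the returned index is the returned remaining suffix. The subtype bound
-- (the remainder is no longer than the input) is Lean's termination certificate.
def parseB (rest : List String) (depth total : Int) :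
    {p : Int × List String × Bool // p.2.1.length ≤ rest.length} :=
  match rest with
  | [] => ⟨(total, [], false), by simp⟩
  | v :: rs =>
    if v = ")" then ⟨(total, rs, true), by simp⟩
    else if v = "(" ∧ rs.head? = some ")" then
      -- a laser '()' : add depth, continue after it
      match parseB rs.tail depth (total + depth) with
      | ⟨p, hp⟩ => ⟨p, by
          refine hp.trans ?_
          cases rs <;> simp <;> omega⟩
    else if v = "(" then
      -- a rod: parse the inner level, then continue this level after it
      match parseB rs (depth + 1) 0 with
      | ⟨(s, r, c), hr⟩ =>
        match parseB r depth (total + s + (if c then 1 else 0)) with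
        | ⟨q, hq⟩ => ⟨q, by
            refine hq.trans (le_trans hr ?_); simp⟩
    else
      match parseB rs depth total with
      | ⟨p, hp⟩ => ⟨p, by exact hp.trans (by simp)⟩
termination_by rest.length
decreasing_by
  · cases rs <;> simp
  · simp
  · simpa using Nat.lt_succ_of_le hr
  · simp

def solution_alt (input_list : List String) : Int :=
  (parseB input_list 0 0).val.1

-- ===== PRECONDITION & SPEC =====
-- Pre_ excludes exactly the inputs with an unmatched ')', on which A's stack.pop() raises IndexError.
def Pre_solution (input_list : List String) : Prop :=
  ∀ k : Nat, k ≤ input_list.length →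
    (input_list.take k).count ")" ≤ (input_list.take k).count "("
instance (input_list : List String) : Decidable (Pre_solution input_list) := by
  unfold Pre_solution; infer_instance
def pvWitness_solution : List String := ["(", "(", ")", ")", "(", "x", ")"]

def Spec_solution (input_list : List String) (out : Int) : Prop := out = solution_alt input_list
instance (input_list : List String) (out : Int) : Decidable (Spec_solution input_list out) := by unfold Spec_solution; infer_instance

-- ===== CLAIM (what is proved, stated in full; the proofs are below) =====
def Claim_equal_solution : Prop := ∀ (input_list : List String), Dom_solution input_list → Pre_solution input_list → Spec_solution input_list (solution input_list)

-- ===== LEMMAS AND PROOFS =====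

-- proof-only intermediate program: the depth/prev fold (one loop step on state (depth, result, prev))
def stepB (st : Int × Int × Option String) (v : String) : Int × Int × Option String :=
  if v = "(" then (st.1 + 1, st.2.1, some v)
  else if v = ")" then
    (st.1 - 1, (if st.2.2 = some "(" then st.2.1 + (st.1 - 1) else st.2.1 + 1), some v)
  else (st.1, st.2.1, some v)

-- running balance: no prefix of l pops below depth d
def Bal : Nat → List String → Prop
  | _, [] => True
  | d, v :: r => if v = "(" then Bal (d+1) r else if v = ")" then 0 < d ∧ Bal (d-1) r else Bal d r

lemma Bal_cons (d : Nat) (v : String) (r : List String) :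
    Bal d (v :: r) = if v = "(" then Bal (d+1) r
      else if v = ")" then 0 < d ∧ Bal (d-1) r else Bal d r := rfl

lemma stepA_open (st : List (Int × String) × Int) (i : Int) :
    stepA st (i, "(") = (st.1 ++ [(i, "(")], st.2) := by simp [stepA]

lemma stepA_close (st : List (Int × String) × Int) (i : Int) (t : Int × String)
    (rest : List (Int × String)) (h : PySem.List.pop? st.1 (-1) = some (t, rest)) :
    stepA st (i, ")")
      = (if i - t.1 = 1 then (rest, st.2 + rest.length) else (rest, st.2 + 1)) := by
  simp [stepA, h]

lemma stepA_other (st : List (Int × String) × Int) (i : Int) (v : String)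
    (h1 : v ≠ "(") (h2 : v ≠ ")") : stepA st (i, v) = st := by simp [stepA, h1, h2]

lemma stepB_open (st : Int × Int × Option String) :
    stepB st "(" = (st.1 + 1, st.2.1, some "(") := by simp [stepB]

lemma stepB_close (st : Int × Int × Option String) :
    stepB st ")" = (st.1 - 1,
      (if st.2.2 = some "(" then st.2.1 + (st.1 - 1) else st.2.1 + 1), some ")") := by
  simp [stepB]

lemma stepB_other (st : Int × Int × Option String) (v : String)
    (h1 : v ≠ "(") (h2 : v ≠ ")") : stepB st v = (st.1, st.2.1, some v) := by
  simp [stepB, h1, h2]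

lemma bal_of_counts (l : List String) (d : Nat)
    (h : ∀ k : Nat, k ≤ l.length → (l.take k).count ")" ≤ d + (l.take k).count "(") :
    Bal d l := by
  induction l generalizing d with
  | nil => trivial
  | cons v r ih =>
    have h1 := h 1 (by simp)
    by_cases hvo : v = "("
    · subst hvo
      rw [Bal_cons, if_pos rfl]
      apply ih
      intro k hk
      have := h (k+1) (by simpa using hk)
      simp [List.count_cons] at this ⊢
      omega
    · by_cases hvc : v = ")"
      · subst hvc
        rw [Bal_cons, if_neg (show (")" : String) ≠ "(" by decide), if_pos rfl]
        have hd : 0 < d := by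
          simp [List.count_cons] at h1; omega
        refine ⟨hd, ih (d-1) ?_⟩
        intro k hk
        have := h (k+1) (by simpa using hk)
        simp [List.count_cons] at this ⊢
        omega
      · rw [Bal_cons, if_neg hvo, if_neg hvc]
        apply ih
        intro k hk
        have := h (k+1) (by simpa using hk)
        simp [List.count_cons, hvo, hvc] at this ⊢
        omega

-- main loop invariant: A's enumerate/stack fold and the depth/prev fold agree
lemma main_inv (l : List String) (i : Nat) (stack : List (Int × String)) (res : Int)
    (prev : Option String)
    (hbal : Bal stack.length l)
    (hstack : ∀ p ∈ stack, p.2 = "(" ∧ ∃ j : Nat, p.1 = (j : Int) ∧ j < i)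
    (htop : prev = some "(" ↔ ∃ s, stack = s ++ [((i : Int) - 1, "(")]) :
    ((PySem.List.enumerate l (i : Int)).foldl stepA (stack, res)).2
      = (l.foldl stepB ((stack.length : Int), res, prev)).2.1 := by
  induction l generalizing i stack res prev with
  | nil => simp [PySem.List.enumerate_nil]
  | cons v r ih =>
    rw [PySem.List.enumerate_cons]
    have hcast : ((i : Int)) + 1 = ((i + 1 : Nat) : Int) := by push_cast; ring
    have hm : ((i + 1 : Nat) : Int) - 1 = (i : Int) := by push_cast; ring
    by_cases hvo : v = "("
    · subst hvo
      simp only [List.foldl_cons, stepA_open, stepB_open]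
      have h2 : ((stack.length : Int)) + 1
          = (((stack ++ [((i : Int), "(")]).length : Nat) : Int) := by
        simp
      rw [hcast, h2]
      apply ih
      · simpa [Bal_cons] using hbal
      · intro p hp
        rcases List.mem_append.1 hp with hp | hp
        · obtain ⟨h3, j, hj, hjl⟩ := hstack p hp
          exact ⟨h3, j, hj, by omega⟩
        · simp at hp
          exact ⟨by simp [hp], i, by simp [hp], by omega⟩
      · constructor
        · intro _
          exact ⟨stack, by rw [hm]⟩
        · intro _; rfl
    · by_cases hvc : v = ")"
      · subst hvc
        have hbal' : 0 < stack.length ∧ Bal (stack.length - 1) r := by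
          rw [Bal_cons, if_neg (show (")" : String) ≠ "(" by decide), if_pos rfl] at hbal
          exact hbal
        obtain ⟨hpos, hbr⟩ := hbal'
        have hne : stack ≠ [] := by
          intro h; rw [h] at hpos; simp at hpos
        have hpop : PySem.List.pop? stack (-1)
            = some (stack.getLast hne, stack.dropLast) := by
          conv_lhs => rw [← List.dropLast_append_getLast hne]
          exact PySem.List.pop?_last _ _
        have hlast_mem : stack.getLast hne ∈ stack := List.getLast_mem hne
        -- the adjacency test equals the prev test
        have hiff : ((i : Int) - (stack.getLast hne).1 = 1) ↔ prev = some "(" := by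
          constructor
          · intro hadj
            obtain ⟨h3, j, hj, hjl⟩ := hstack _ hlast_mem
            have h5 : stack.getLast hne = ((i : Int) - 1, "(") := by
              refine Prod.ext ?_ h3
              simp only []
              omega
            apply htop.2
            refine ⟨stack.dropLast, ?_⟩
            rw [← h5, List.dropLast_append_getLast hne]
          · intro hp
            obtain ⟨s, hs⟩ := htop.1 hp
            have : stack.getLast hne = ((i : Int) - 1, "(") := by
              rw [List.getLast_congr _ _ hs] <;> simp
            rw [this]; ring
        have hlen : ((stack.length : Int)) - 1 = ((stack.dropLast.length : Nat) : Int) := by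
          simp [List.length_dropLast]; omega
        simp only [List.foldl_cons]
        rw [stepA_close (stack, res) ((i : Int)) _ _ hpop,
            stepB_close ((stack.length : Int), res, prev)]
        have hres : (if (i : Int) - (stack.getLast hne).1 = 1
              then (stack.dropLast, res + (stack.dropLast.length : Int))
              else (stack.dropLast, res + 1))
            = (stack.dropLast,
               if prev = some "(" then res + ((stack.length : Int) - 1) else res + 1) := by
          by_cases hp : prev = some "("
          · rw [if_pos (hiff.2 hp), if_pos hp, hlen]
          · rw [if_neg (fun h => hp (hiff.1 h)), if_neg hp]
        rw [hres, hcast, hlen]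
        apply ih
        · simpa [List.length_dropLast] using hbr
        · intro p hp'
          obtain ⟨h3, j, hj, hjl⟩ := hstack p (List.mem_of_mem_dropLast hp')
          exact ⟨h3, j, hj, by omega⟩
        · constructor
          · intro h; injection h with h; exact absurd h (by decide)
          · rintro ⟨s, hs⟩
            have hmem : (((i : Int)), ("(" : String)) ∈ stack.dropLast := by
              rw [hs, ← hm]; simp
            obtain ⟨_, j, hj, hjl⟩ := hstack _ (List.mem_of_mem_dropLast hmem)
            simp at hj; omega
      · simp only [List.foldl_cons, stepA_other _ _ _ hvo hvc, stepB_other _ _ hvo hvc]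
        rw [hcast]
        apply ih
        · rw [Bal_cons, if_neg hvo, if_neg hvc] at hbal; exact hbal
        · intro p hp
          obtain ⟨h3, j, hj, hjl⟩ := hstack p hp
          exact ⟨h3, j, hj, by omega⟩
        · constructor
          · intro h; injection h with h; exact absurd h hvo
          · rintro ⟨s, hs⟩
            have hmem : (((i : Int)), ("(" : String)) ∈ stack := by
              rw [hs, ← hm]; simp
            obtain ⟨_, j, hj, hjl⟩ := hstack _ hmem
            simp at hj; omega

-- step equations of parseB
lemma parseB_nil (d t : Int) : (parseB [] d t).val = (t, [], false) := by
  rw [parseB]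

lemma parseB_close (rs : List String) (d t : Int) :
    (parseB (")"::rs) d t).val = (t, rs, true) := by
  rw [parseB]
  simp

lemma parseB_laser (rs : List String) (d t : Int) (h : rs.head? = some ")") :
    (parseB ("("::rs) d t).val = (parseB rs.tail d (t + d)).val := by
  rw [parseB]
  obtain ⟨p, hp⟩ := parseB rs.tail d (t + d)
  simp [h]

lemma parseB_rod (rs : List String) (d t : Int) (h : rs.head? ≠ some ")") :
    (parseB ("("::rs) d t).val =
      (parseB (parseB rs (d+1) 0).val.2.1 d
        (t + (parseB rs (d+1) 0).val.1 + (if (parseB rs (d+1) 0).val.2.2 then 1 else 0))).val := by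
  rw [parseB]
  obtain ⟨⟨s, r, c⟩, hr⟩ := parseB rs (d+1) 0
  simp only [h]
  obtain ⟨q, hq⟩ := parseB r d (t + s + if c = true then (1:Int) else 0)
  simp [h]

lemma parseB_other (v : String) (rs : List String) (d t : Int) (h1 : v ≠ ")") (h2 : v ≠ "(") :
    (parseB (v::rs) d t).val = (parseB rs d t).val := by
  rw [parseB]
  obtain ⟨p, hp⟩ := parseB rs d t
  simp [h1, h2]

-- when parseB does not meet a closer, it consumes its whole input
lemma parse_not_closed : ∀ (n : Nat) (rest : List String), rest.length ≤ n → ∀ (d t : Int),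
    (parseB rest d t).val.2.2 = false → (parseB rest d t).val.2.1 = [] := by
  intro n
  induction n with
  | zero =>
    intro rest hlen d t
    have : rest = [] := by cases rest <;> simp_all
    subst this
    simp [parseB_nil]
  | succ n ih =>
    intro rest hlen d t
    match rest with
    | [] => simp [parseB_nil]
    | v :: rs =>
      simp only [List.length_cons] at hlen
      by_cases hc : v = ")"
      · subst hc; simp [parseB_close]
      · by_cases ho : v = "("
        · subst ho
          by_cases hh : rs.head? = some ")"
          · rw [parseB_laser rs d t hh]
            exact ih rs.tail (by cases rs <;> simp_all <;> omega) d (t + d)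
          · rw [parseB_rod rs d t hh]
            exact ih _ (le_trans (parseB rs (d+1) 0).property (by omega)) d _
        · rw [parseB_other v rs d t hc ho]
          exact ih rs (by omega) d t

-- on a balanced segment an unmatched closer is met only below a positive balance,
-- and the remainder stays balanced one level up
lemma parse_bal : ∀ (n : Nat) (rest : List String), rest.length ≤ n → ∀ (k : Nat) (d t : Int),
    Bal k rest → (parseB rest d t).val.2.2 = true →
      0 < k ∧ Bal (k-1) (parseB rest d t).val.2.1 := by
  intro n
  induction n with
  | zero =>
    intro rest hlen k d t _ hc
    have : rest = [] := by cases rest <;> simp_all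
    subst this
    simp [parseB_nil] at hc
  | succ n ih =>
    intro rest hlen k d t hbal hc
    match rest with
    | [] => simp [parseB_nil] at hc
    | v :: rs =>
      simp only [List.length_cons] at hlen
      by_cases hcv : v = ")"
      · subst hcv
        have hb : 0 < k ∧ Bal (k-1) rs := by simpa [Bal] using hbal
        rw [parseB_close] at hc ⊢
        exact ⟨hb.1, hb.2⟩
      · by_cases ho : v = "("
        · subst ho
          have hbal2 : Bal (k+1) rs := by simpa [Bal] using hbal
          by_cases hh : rs.head? = some ")"
          · cases rs with
            | nil => simp at hh
            | cons w rs2 =>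
              have hw : w = ")" := by simpa using hh
              subst hw
              have hb2 : Bal k rs2 := by
                have h2 : 0 < k + 1 ∧ Bal k rs2 := by simpa [Bal] using hbal2
                exact h2.2
              rw [parseB_laser _ d t (by simp)] at hc ⊢
              exact ih rs2 (by simp at hlen; omega) k d _ hb2 (by simpa using hc)
          · rw [parseB_rod rs d t hh] at hc ⊢
            by_cases hpc : (parseB rs (d+1) 0).val.2.2 = true
            · have hbr : Bal k (parseB rs (d+1) 0).val.2.1 := by
                have := ih rs (by omega) (k+1) (d+1) 0 hbal2 hpc
                simpa using this.2
              exact ih _ (le_trans (parseB rs (d+1) 0).property (by omega)) k d _ hbr hc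
            · have hr0 : (parseB rs (d+1) 0).val.2.1 = [] :=
                parse_not_closed rs.length rs le_rfl (d+1) 0 (by simpa using hpc)
              rw [hr0] at hc
              simp [parseB_nil] at hc
        · rw [parseB_other v rs d t hcv ho] at hc ⊢
          have hbr : Bal k rs := by simpa [Bal, hcv, ho] using hbal
          exact ih rs (by omega) k d t hbr hc

-- the depth/prev fold computes what parseB computes
lemma parse_fold : ∀ (n : Nat) (rest : List String), rest.length ≤ n →
    ∀ (d total res : Int) (prev : Option String),
    (rest.head? = some ")" → prev ≠ some "(") →
    ((parseB rest d total).val.2.2 = true →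
        rest.foldl stepB (d, res, prev)
          = (parseB rest d total).val.2.1.foldl stepB
              (d - 1, res + ((parseB rest d total).val.1 - total) + 1, some ")"))
    ∧ ((parseB rest d total).val.2.2 = false →
        (rest.foldl stepB (d, res, prev)).2.1 = res + ((parseB rest d total).val.1 - total)) := by
  intro n
  induction n with
  | zero =>
    intro rest hlen d total res prev _
    have : rest = [] := by cases rest <;> simp_all
    subst this
    constructor
    · intro hc; simp [parseB_nil] at hc
    · intro _; simp [parseB_nil]
  | succ n ih =>
    intro rest hlen d total res prev hprev
    match rest with
    | [] =>
      constructor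
      · intro hc; simp [parseB_nil] at hc
      · intro _; simp [parseB_nil]
    | v :: rs =>
      simp only [List.length_cons] at hlen
      by_cases hcv : v = ")"
      · subst hcv
        have hp : prev ≠ some "(" := hprev (by simp)
        rw [parseB_close]
        have hstep : stepB (d, res, prev) ")" = (d - 1, res + 1, some ")") := by
          simp [stepB, hp]
        constructor
        · intro _
          simp only [List.foldl_cons, hstep]
          norm_num
        · intro hc; simp at hc
      · by_cases ho : v = "("
        · subst ho
          by_cases hh : rs.head? = some ")"
          · cases rs with
            | nil => simp at hh
            | cons w rs2 =>
              have hw : w = ")" := by simpa using hh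
              subst hw
              rw [parseB_laser _ d total (by simp)]
              simp only [List.tail_cons]
              have hstep1 : stepB (d, res, prev) "(" = (d + 1, res, some "(") := by
                simp [stepB]
              have hstep2 : stepB (d + 1, res, some "(") ")" = (d, res + d, some ")") := by
                simp [stepB]
              have hIH := ih rs2 (by simp at hlen; omega) d (total + d) (res + d) (some ")")
                (by intro _ h; simp at h)
              constructor
              · intro hc
                have h1 := hIH.1 hc
                simp only [List.foldl_cons, hstep1, hstep2]
                rw [show res + d + ((parseB rs2 d (total + d)).val.1 - (total + d)) + 1
                    = res + ((parseB rs2 d (total + d)).val.1 - total) + 1 by ring] at h1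
                rw [h1]
              · intro hc
                have h1 := hIH.2 hc
                simp only [List.foldl_cons, hstep1, hstep2]
                rw [h1]
                ring
          · rw [parseB_rod rs d total hh]
            have hstep1 : stepB (d, res, prev) "(" = (d + 1, res, some "(") := by
              simp [stepB]
            have hIH1 := ih rs (by omega) (d + 1) 0 res (some "(")
              (by intro h _; exact hh h)
            by_cases hpc : (parseB rs (d+1) 0).val.2.2 = true
            · have h1 := hIH1.1 hpc
              simp only [hpc, if_true] at *
              have hIH2 := ih (parseB rs (d+1) 0).val.2.1
                (le_trans (parseB rs (d+1) 0).property (by omega)) d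
                (total + (parseB rs (d+1) 0).val.1 + 1)
                (res + ((parseB rs (d+1) 0).val.1 - 0) + 1) (some ")")
                (by intro _ h; simp at h)
              have harg : (d + 1 - 1, res + ((parseB rs (d+1) 0).val.1 - 0) + 1, some ")")
                  = ((d : Int), res + (parseB rs (d+1) 0).val.1 + 1, some ")") := by
                rw [show (d:Int) + 1 - 1 = d by ring,
                    show res + ((parseB rs (d+1) 0).val.1 - 0) + 1
                      = res + (parseB rs (d+1) 0).val.1 + 1 by ring]
              constructor
              · intro hc
                have h2 := hIH2.1 hc
                simp only [List.foldl_cons, hstep1]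
                rw [h1, harg]
                rw [show res + ((parseB rs (d+1) 0).val.1 - 0) + 1
                    = res + (parseB rs (d+1) 0).val.1 + 1 by ring] at h2
                rw [show res + (parseB rs (d+1) 0).val.1 + 1 +
                      ((parseB (parseB rs (d+1) 0).val.2.1 d (total + (parseB rs (d+1) 0).val.1 + 1)).val.1
                        - (total + (parseB rs (d+1) 0).val.1 + 1)) + 1
                    = res + ((parseB (parseB rs (d+1) 0).val.2.1 d (total + (parseB rs (d+1) 0).val.1 + 1)).val.1
                        - total) + 1 by ring] at h2
                rw [h2]
              · intro hc
                have h2 := hIH2.2 hc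
                simp only [List.foldl_cons, hstep1]
                rw [h1, harg]
                rw [show res + ((parseB rs (d+1) 0).val.1 - 0) + 1
                    = res + (parseB rs (d+1) 0).val.1 + 1 by ring] at h2
                rw [h2]
                ring
            · have hr0 : (parseB rs (d+1) 0).val.2.1 = [] :=
                parse_not_closed rs.length rs le_rfl (d+1) 0 (by simpa using hpc)
              have hcf : (parseB rs (d+1) 0).val.2.2 = false := by simpa using hpc
              rw [hr0, hcf]
              simp only [if_false, Bool.false_eq_true]
              constructor
              · intro hc; simp [parseB_nil] at hc
              · intro _
                simp only [parseB_nil, List.foldl_cons, hstep1]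
                have h1 := hIH1.2 hcf
                rw [h1]
                ring
        · rw [parseB_other v rs d total hcv ho]
          have hstep1 : stepB (d, res, prev) v = (d, res, some v) := by
            simp [stepB, hcv, ho]
          have hIH := ih rs (by omega) d total res (some v)
            (by intro _ h; injection h with h; exact ho h)
          constructor
          · intro hc
            simp only [List.foldl_cons, hstep1]
            exact hIH.1 hc
          · intro hc
            simp only [List.foldl_cons, hstep1]
            exact hIH.2 hc

-- ===== VERDICT (by name: the statement is the Claim_ definition above) =====
theorem solution_spec : Claim_equal_solution := by
  intro l _ hpre
  unfold Spec_solution solution solution_alt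
  have hbal : Bal 0 l := bal_of_counts l 0 (by simpa using hpre)
  have hAB := main_inv l 0 [] 0 none (by simpa using hbal) (by simp)
    (by constructor
        · intro h; exact absurd h (by simp)
        · rintro ⟨s, hs⟩; simp at hs)
  have hc : (parseB l 0 0).val.2.2 = false := by
    cases hcc : (parseB l 0 0).val.2.2
    · rfl
    · exact absurd (parse_bal l.length l le_rfl 0 0 0 hbal hcc).1 (by omega)
  have hBF := (parse_fold l.length l le_rfl 0 0 0 none (by intro _ h; exact absurd h (by simp))).2 hc
  simp only [List.length_nil, Nat.cast_zero] at hAB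
  rw [hAB, hBF]
  ring
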